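-- pv_equiv track=rewrite | github.com/Asurelia/botting | modules/professions/farmer_refactored.py | _cluster_pattern
-- ===== SOURCE A (Python) =====
-- from typing import Dict, List, Tuple, Optional, Any
--
-- def _cluster_pattern(center_pos: Tuple[int, int], resources_count: int) -> List[Tuple[int, int]]:
--     """Pattern en cluster de collecte"""
--     positions = []
--     x, y = center_pos
--
--     # Centre
--     positions.append((x, y))
--
--     # Cercles concentriques
--     radius = 1
--     while len(positions) < resources_count:
--         for dx in range(-radius, radius + 1):
--             for dy in range(-radius, radius + 1):
--                 if abs(dx) == radius or abs(dy) == radius: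
--                     positions.append((x + dx, y + dy))
--                     if len(positions) >= resources_count:
--                         break
--             if len(positions) >= resources_count:
--                 break
--         radius += 1
--
--     return positions[:resources_count]
-- ===== SOURCE B (Python) =====
-- from math import isqrt
--
-- def _cluster_pattern(center_pos, resources_count):
--     """Pattern en cluster de collecte"""
--     x, y = center_pos
--
--     def cell(k):
--         # closed-form index -> cell mapping: cell k of the spiral, O(1) per cell
--         if k == 0:
--             return (x, y)
--         r = (isqrt(k) + 1) // 2          # ring r covers indices [(2r-1)^2, (2r+1)^2)
--         j = k - (2 * r - 1) ** 2         # offset inside ring r, 0 <= j < 8r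
--         if j <= 2 * r:                   # left column, dy = -r..r
--             return (x - r, y - r + j)
--         if j < 6 * r - 1:                # interior columns, two cells each
--             m = j - (2 * r + 1)
--             return (x - r + 1 + m // 2, y - r if m % 2 == 0 else y + r)
--         return (x + r, y - r + (j - (6 * r - 1)))   # right column
--
--     return [cell(k) for k in range(resources_count)]
-- ===== Notes on version B (the rewrite author's own statement) =====
-- stated objective: faster
-- what changed: B has no spiral-building loop at all: it maps each index k in range(n) independently through a closed-form index-to-coordinate formula (ring r = (isqrt(k)+1)//2 from the invariant that ring r starts at index (2r-1)^2, then arithmetic on the offset picks left column / interior pair / right column), instead of A's while loop that grows the position list ring by ring scanning a full (2r+1)x(2r+1) square.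
import Mathlib
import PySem

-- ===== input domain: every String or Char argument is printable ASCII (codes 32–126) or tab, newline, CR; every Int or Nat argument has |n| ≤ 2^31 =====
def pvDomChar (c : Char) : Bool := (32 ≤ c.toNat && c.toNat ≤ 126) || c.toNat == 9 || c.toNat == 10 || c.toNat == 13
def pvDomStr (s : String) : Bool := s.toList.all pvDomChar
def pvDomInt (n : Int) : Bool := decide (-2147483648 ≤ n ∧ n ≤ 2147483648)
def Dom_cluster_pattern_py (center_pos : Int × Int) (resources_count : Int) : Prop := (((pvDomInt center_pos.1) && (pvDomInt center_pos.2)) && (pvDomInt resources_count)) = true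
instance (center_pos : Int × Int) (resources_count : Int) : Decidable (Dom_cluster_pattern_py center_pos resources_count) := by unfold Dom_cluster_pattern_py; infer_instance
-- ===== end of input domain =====

-- B replaces A's ring-growing while loop (which scans a full (2r+1)×(2r+1) square per ring)
-- by a closed-form index→coordinate mapping applied independently to each k in range(n).
-- Objective: faster (asymptotic).

-- ===== PORT A =====
-- inner 'for dy in range(-radius, radius+1)' loop with its break
def pvDyLoopA (x y dx radius count : Int) : List Int → List (Int × Int) → List (Int × Int)
  | [], ps => ps
  | dy :: rest, ps =>
    if |dx| = radius ∨ |dy| = radius then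
      let ps' := ps ++ [(x + dx, y + dy)]
      if count ≤ (ps'.length : Int) then ps'      -- break (outer loops also break on len ≥ count)
      else pvDyLoopA x y dx radius count rest ps'
    else pvDyLoopA x y dx radius count rest ps

-- outer 'for dx in range(-radius, radius+1)' loop with its break
def pvDxLoopA (x y radius count : Int) : List Int → List (Int × Int) → List (Int × Int)
  | [], ps => ps
  | dx :: rest, ps =>
    let ps' := pvDyLoopA x y dx radius count (PySem.List.pyRange (-radius) (radius + 1) 1) ps
    if count ≤ (ps'.length : Int) then ps'
    else pvDxLoopA x y radius count rest ps'

-- (the next four lemmas are cited by pvWhileA's decreasing_by, so they stay above the port)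
theorem pvDyLoopA_len_le (x y dx radius count : Int) (dys : List Int) (ps : List (Int × Int)) :
    ps.length ≤ (pvDyLoopA x y dx radius count dys ps).length := by
  induction dys generalizing ps with
  | nil => simp [pvDyLoopA]
  | cons dy rest ih =>
    simp only [pvDyLoopA]
    split_ifs with h1 h2
    · simp
    · exact le_trans (by simp) (ih (ps ++ [(x + dx, y + dy)]))
    · exact ih ps

theorem pvDyLoopA_len_lt (x y dx radius count : Int) (dy : Int) (rest : List Int)
    (ps : List (Int × Int)) (hdx : |dx| = radius) :
    ps.length < (pvDyLoopA x y dx radius count (dy :: rest) ps).length := by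
  simp only [pvDyLoopA, hdx, true_or, if_true]
  split_ifs with h
  · simp
  · exact lt_of_lt_of_le (by simp) (pvDyLoopA_len_le x y dx radius count rest _)

theorem pvDxLoopA_len_le (x y radius count : Int) (dxs : List Int) (ps : List (Int × Int)) :
    ps.length ≤ (pvDxLoopA x y radius count dxs ps).length := by
  induction dxs generalizing ps with
  | nil => simp [pvDxLoopA]
  | cons dx rest ih =>
    simp only [pvDxLoopA]
    split_ifs with h
    · exact pvDyLoopA_len_le x y dx radius count _ ps
    · exact le_trans (pvDyLoopA_len_le x y dx radius count _ ps) (ih _)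

theorem pvDxLoopA_len_lt (x y radius count : Int) (ps : List (Int × Int)) (hr : 1 ≤ radius) :
    ps.length < (pvDxLoopA x y radius count (PySem.List.pyRange (-radius) (radius + 1) 1) ps).length := by
  rw [PySem.List.pyRange_one_cons (by omega)]
  simp only [pvDxLoopA]
  have hfirst : ps.length < (pvDyLoopA x y (-radius) radius count
      (PySem.List.pyRange (-radius) (radius + 1) 1) ps).length := by
    rw [PySem.List.pyRange_one_cons (by omega)]
    exact pvDyLoopA_len_lt x y (-radius) radius count _ _ ps (by rw [abs_neg]; exact abs_of_nonneg (by omega))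
  split_ifs with h
  · exact hfirst
  · exact lt_of_lt_of_le hfirst (pvDxLoopA_len_le x y radius count _ _)

-- the 'while len(positions) < resources_count' loop; radius = rm1 + 1 (radius starts at 1)
def pvWhileA (x y count : Int) (rm1 : Nat) (ps : List (Int × Int)) : List (Int × Int) :=
  if h : (ps.length : Int) < count then
    pvWhileA x y count (rm1 + 1)
      (pvDxLoopA x y ((rm1 : Int) + 1) count
        (PySem.List.pyRange (-((rm1 : Int) + 1)) (((rm1 : Int) + 1) + 1) 1) ps)
  else ps
termination_by (count - ps.length).toNat
decreasing_by
  have := pvDxLoopA_len_lt x y ((rm1 : Int) + 1) count ps (by omega)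
  omega

def cluster_pattern_py (center_pos : Int × Int) (resources_count : Int) : List (Int × Int) :=
  let x := center_pos.1
  let y := center_pos.2
  PySem.List.slice (pvWhileA x y resources_count 0 [(x, y)]) none (some resources_count)

-- ===== PORT B =====
-- the helper 'cell(k)': closed-form index→coordinate mapping.
-- math.isqrt(k) is ported as Nat.sqrt k.toNat — exact for k ≥ 0, and cell is only
-- applied to k ∈ range(n), so k ≥ 0 always (Python isqrt raises on k < 0, unreachable).
def pvCellB (x y k : Int) : Int × Int :=
  if k = 0 then (x, y)
  else
    let r : Int := PySem.Int.floordiv ((Nat.sqrt k.toNat : Int) + 1) 2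
    let j : Int := k - (2 * r - 1) ^ 2
    if j ≤ 2 * r then (x - r, y - r + j)
    else if j < 6 * r - 1 then
      let m := j - (2 * r + 1)
      (x - r + 1 + PySem.Int.floordiv m 2,
       if PySem.Int.mod m 2 = 0 then y - r else y + r)
    else (x + r, y - r + (j - (6 * r - 1)))

def cluster_pattern_py_alt (center_pos : Int × Int) (resources_count : Int) : List (Int × Int) :=
  let x := center_pos.1
  let y := center_pos.2
  (PySem.List.pyRange 0 resources_count 1).map (pvCellB x y)

-- ===== PRECONDITION & SPEC =====
def Spec_cluster_pattern_py (center_pos : Int × Int) (resources_count : Int) (out : List (Int × Int)) : Prop := out = cluster_pattern_py_alt center_pos resources_count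
instance (center_pos : Int × Int) (resources_count : Int) (out : List (Int × Int)) : Decidable (Spec_cluster_pattern_py center_pos resources_count out) := by unfold Spec_cluster_pattern_py; infer_instance

-- ===== CLAIM (what is proved, stated in full; the proofs are below) =====
def Claim_equal_cluster_pattern_py : Prop := ∀ (center_pos : Int × Int) (resources_count : Int), Dom_cluster_pattern_py center_pos resources_count → Spec_cluster_pattern_py center_pos resources_count (cluster_pattern_py center_pos resources_count)

-- ===== LEMMAS AND PROOFS =====

-- what A's dy-loop would append without the break
def pvRowEmit (x y dx radius : Int) (dys : List Int) : List (Int × Int) :=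
  (dys.filter (fun dy => decide (|dx| = radius ∨ |dy| = radius))).map (fun dy => (x + dx, y + dy))

-- what A's dx-loop would append without the breaks
def pvRingEmitA (x y radius : Int) (dxs : List Int) : List (Int × Int) :=
  dxs.flatMap (fun dx => pvRowEmit x y dx radius (PySem.List.pyRange (-radius) (radius + 1) 1))

-- the ring, perimeter-only shape
def pvRingEmitB (x y radius : Int) (dxs : List Int) : List (Int × Int) :=
  dxs.flatMap (fun dx =>
    if dx = -radius ∨ dx = radius then
      (PySem.List.pyRange (-radius) (radius + 1) 1).map (fun dy => (x + dx, y + dy))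
    else [(x + dx, y - radius), (x + dx, y + radius)])

def pvRing (x y radius : Int) : List (Int × Int) :=
  pvRingEmitB x y radius (PySem.List.pyRange (-radius) (radius + 1) 1)

-- the infinite spiral, truncated after ring R
def pvSpiral (x y : Int) : Nat → List (Int × Int)
  | 0 => [(x, y)]
  | R + 1 => pvSpiral x y R ++ pvRing x y ((R : Int) + 1)

theorem pvDyLoopA_eq_take (x y dx radius count : Int) (dys : List Int) (ps : List (Int × Int))
    (h : (ps.length : Int) < count) :
    pvDyLoopA x y dx radius count dys ps =
      List.take count.toNat (ps ++ pvRowEmit x y dx radius dys) := by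
  induction dys generalizing ps with
  | nil =>
    simp [pvDyLoopA, pvRowEmit, List.take_of_length_le (by omega : ps.length ≤ count.toNat)]
  | cons dy rest ih =>
    simp only [pvDyLoopA]
    by_cases hc : |dx| = radius ∨ |dy| = radius
    · simp only [if_pos hc]
      have hrow : pvRowEmit x y dx radius (dy :: rest) =
          (x + dx, y + dy) :: pvRowEmit x y dx radius rest := by
        simp [pvRowEmit, hc]
      split_ifs with hstop
      · have hcnt : count.toNat = ps.length + 1 := by simp at hstop; omega
        rw [hrow, hcnt]
        rw [show ps ++ (x + dx, y + dy) :: pvRowEmit x y dx radius rest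
              = (ps ++ [(x + dx, y + dy)]) ++ pvRowEmit x y dx radius rest by simp]
        rw [List.take_append_of_le_length (by simp)]
        simp
      · have h' : ((ps ++ [(x + dx, y + dy)]).length : Int) < count := by simp at hstop ⊢; omega
        rw [ih _ h', hrow]
        simp
    · simp only [if_neg hc]
      have hrow : pvRowEmit x y dx radius (dy :: rest) = pvRowEmit x y dx radius rest := by
        simp [pvRowEmit, hc]
      rw [ih ps h, hrow]

theorem pvDxLoopA_eq_take (x y radius count : Int) (dxs : List Int) (ps : List (Int × Int))
    (h : (ps.length : Int) < count) :
    pvDxLoopA x y radius count dxs ps =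
      List.take count.toNat (ps ++ pvRingEmitA x y radius dxs) := by
  induction dxs generalizing ps with
  | nil =>
    simp [pvDxLoopA, pvRingEmitA, List.take_of_length_le (by omega : ps.length ≤ count.toNat)]
  | cons dx rest ih =>
    simp only [pvDxLoopA]
    rw [pvDyLoopA_eq_take x y dx radius count _ ps h]
    have hring : pvRingEmitA x y radius (dx :: rest) =
        pvRowEmit x y dx radius (PySem.List.pyRange (-radius) (radius + 1) 1) ++
          pvRingEmitA x y radius rest := by
      simp [pvRingEmitA]
    set row := pvRowEmit x y dx radius (PySem.List.pyRange (-radius) (radius + 1) 1) with hrow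
    split_ifs with hstop
    · have hlen : count.toNat ≤ (ps ++ row).length := by
        simp only [List.length_take] at hstop
        omega
      rw [hring, ← List.append_assoc, List.take_append_of_le_length hlen]
    · have hfull : List.take count.toNat (ps ++ row) = ps ++ row := by
        apply List.take_of_length_le
        simp only [List.length_take] at hstop
        omega
      rw [hfull] at hstop ⊢
      rw [ih _ (by omega), hring, List.append_assoc]

-- the middle of the dy-range contains no cell with |dy| = radius
theorem pvFilter_middle (radius : Int) (hr : 1 ≤ radius) :
    (PySem.List.pyRange (-radius + 1) radius 1).filter (fun dy => decide (|dy| = radius)) = [] := by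
  rw [List.filter_eq_nil_iff]
  intro dy hmem
  rw [PySem.List.mem_pyRange_one] at hmem
  simp only [decide_eq_true_eq]
  rw [abs_eq (by omega)]
  omega

-- per-column agreement of the filtered and the perimeter-only emissions
theorem pvRow_eq (x y radius dx : Int) (hr : 1 ≤ radius) :
    pvRowEmit x y dx radius (PySem.List.pyRange (-radius) (radius + 1) 1) =
      (if dx = -radius ∨ dx = radius then
        (PySem.List.pyRange (-radius) (radius + 1) 1).map (fun dy => (x + dx, y + dy))
      else [(x + dx, y - radius), (x + dx, y + radius)]) := by
  by_cases hdx : dx = -radius ∨ dx = radius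
  · have habs : |dx| = radius := by
      rw [abs_eq (by omega)]; tauto
    rw [if_pos hdx]
    unfold pvRowEmit
    rw [List.filter_eq_self.mpr (by intro a _; simp [habs])]
  · rw [if_neg hdx]
    have habs : ¬ |dx| = radius := by
      rw [abs_eq (by omega)]; tauto
    unfold pvRowEmit
    have hdec : PySem.List.pyRange (-radius) (radius + 1) 1 =
        -radius :: (PySem.List.pyRange (-radius + 1) radius 1 ++ [radius]) := by
      rw [PySem.List.pyRange_one_cons (by omega),
          PySem.List.pyRange_one_append (-radius + 1) radius (radius + 1) (by omega) (by omega),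
          PySem.List.pyRange_one_singleton]
    rw [hdec]
    simp only [List.filter_cons, List.filter_append, habs, decide_eq_true_eq, false_or]
    rw [pvFilter_middle radius hr]
    have h1 : |(-radius)| = radius := by rw [abs_neg]; exact abs_of_nonneg (by omega)
    have h2 : |radius| = radius := abs_of_nonneg (by omega)
    simp [h1, h2, sub_eq_add_neg]

theorem pvRing_eq (x y radius : Int) (hr : 1 ≤ radius) :
    pvRingEmitA x y radius (PySem.List.pyRange (-radius) (radius + 1) 1) = pvRing x y radius := by
  unfold pvRingEmitA pvRing pvRingEmitB
  apply List.flatMap_congr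
  intro dx _
  exact pvRow_eq x y radius dx hr

-- ring decomposition: left column ++ interior pairs ++ right column
theorem pvRing_decomp (x y r : Int) (hr : 1 ≤ r) :
    pvRing x y r =
      (PySem.List.pyRange (-r) (r + 1) 1).map (fun dy => (x + -r, y + dy)) ++
      ((PySem.List.pyRange (-r + 1) r 1).flatMap (fun dx => [(x + dx, y - r), (x + dx, y + r)]) ++
       (PySem.List.pyRange (-r) (r + 1) 1).map (fun dy => (x + r, y + dy))) := by
  unfold pvRing pvRingEmitB
  have hdec : PySem.List.pyRange (-r) (r + 1) 1 =
      -r :: (PySem.List.pyRange (-r + 1) r 1 ++ [r]) := by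
    rw [PySem.List.pyRange_one_cons (by omega),
        PySem.List.pyRange_one_append (-r + 1) r (r + 1) (by omega) (by omega),
        PySem.List.pyRange_one_singleton]
  conv_lhs => rw [hdec]
  rw [List.flatMap_cons, List.flatMap_append]
  congr 1
  · rw [hdec]; simp
  congr 1
  · apply List.flatMap_congr
    intro dx hdx
    rw [PySem.List.mem_pyRange_one] at hdx
    rw [if_neg (by omega)]
  · rw [hdec]; simp

theorem pvFlatMap_pair_len {α : Type} (l : List Int) (f g : Int → α) :
    (l.flatMap (fun i => [f i, g i])).length = 2 * l.length := by
  induction l with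
  | nil => simp
  | cons a t ih => simp [ih]; omega

theorem pvRing_len (x y r : Int) (hr : 1 ≤ r) :
    (pvRing x y r).length = (8 * r).toNat := by
  rw [pvRing_decomp x y r hr]
  simp only [List.length_append, List.length_map, PySem.List.length_pyRange_one,
    pvFlatMap_pair_len]
  omega

theorem pvSpiral_len (x y : Int) : ∀ R : Nat, (pvSpiral x y R).length = (2 * R + 1) ^ 2 := by
  intro R
  induction R with
  | zero => simp [pvSpiral]
  | succ R ih =>
    simp only [pvSpiral, List.length_append, ih, pvRing_len x y ((R : Int) + 1) (by omega)]
    have h8 : ((8 * ((R : Int) + 1))).toNat = 8 * R + 8 := by omega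
    rw [h8]; ring

theorem pvSpiral_take_stable (x y : Int) (R : Nat) (n : Nat) (hn : n ≤ (pvSpiral x y R).length) :
    ∀ d : Nat, List.take n (pvSpiral x y (R + d)) = List.take n (pvSpiral x y R) := by
  intro d
  induction d with
  | zero => rfl
  | succ d ih =>
    have hlen : n ≤ (pvSpiral x y (R + d)).length := by
      rw [pvSpiral_len] at hn ⊢
      calc n ≤ (2 * R + 1) ^ 2 := hn
        _ ≤ (2 * (R + d) + 1) ^ 2 := Nat.pow_le_pow_left (by omega) 2
    rw [show R + (d + 1) = (R + d) + 1 by omega]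
    simp only [pvSpiral]
    rw [List.take_append_of_le_length hlen, ih]

-- A's while loop computes a take of the spiral
theorem pvWhileA_eq_take (x y n : Int) : ∀ (k R0 : Nat),
    (n - (pvSpiral x y R0).length).toNat ≤ k →
    ((pvSpiral x y R0).length : Int) < n →
    ∀ R : Nat, n ≤ ((pvSpiral x y R).length : Int) →
    pvWhileA x y n R0 (pvSpiral x y R0) = List.take n.toNat (pvSpiral x y R) := by
  intro k
  induction k with
  | zero => intro R0 hk hlt R hR; omega
  | succ k ih =>
    intro R0 hk hlt R hR
    rw [pvWhileA, dif_pos hlt]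
    have hstep : pvDxLoopA x y ((R0 : Int) + 1) n
        (PySem.List.pyRange (-((R0 : Int) + 1)) (((R0 : Int) + 1) + 1) 1) (pvSpiral x y R0) =
        List.take n.toNat (pvSpiral x y (R0 + 1)) := by
      rw [pvDxLoopA_eq_take x y ((R0 : Int) + 1) n _ _ hlt,
          pvRing_eq x y ((R0 : Int) + 1) (by omega)]
      rfl
    rw [hstep]
    by_cases hnext : ((pvSpiral x y (R0 + 1)).length : Int) < n
    · have hfull : List.take n.toNat (pvSpiral x y (R0 + 1)) = pvSpiral x y (R0 + 1) :=
        List.take_of_length_le (by omega)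
      rw [hfull]
      apply ih (R0 + 1) _ hnext R hR
      have hgrow : (pvSpiral x y R0).length < (pvSpiral x y (R0 + 1)).length := by
        rw [pvSpiral_len, pvSpiral_len]
        exact Nat.pow_lt_pow_left (by omega) (by omega)
      omega
    · rw [not_lt] at hnext
      have hlen1 : (List.take n.toNat (pvSpiral x y (R0 + 1))).length = n.toNat := by
        simp only [List.length_take]
        omega
      rw [pvWhileA, dif_neg (by rw [hlen1]; omega)]
      -- stability: R ≥ R0 + 1 because the spiral length at R reaches n but at R0 does not
      have hRge : R0 + 1 ≤ R := by
        by_contra hcon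
        have : R ≤ R0 := by omega
        have : (pvSpiral x y R).length ≤ (pvSpiral x y R0).length := by
          rw [pvSpiral_len, pvSpiral_len]
          exact Nat.pow_le_pow_left (by omega) 2
        omega
      obtain ⟨d, hd⟩ : ∃ d, R = (R0 + 1) + d := ⟨R - (R0 + 1), by omega⟩
      rw [hd, pvSpiral_take_stable x y (R0 + 1) n.toNat (by omega) d]

-- ring r occupies spiral indices [(2r-1)^2, (2r+1)^2): Nat.sqrt recovers r
theorem pvSqrt_ring (rn kn : Nat) (hr : 1 ≤ rn)
    (h1 : (2 * rn - 1) * (2 * rn - 1) ≤ kn) (h2 : kn < (2 * rn + 1) ^ 2) :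
    (Nat.sqrt kn + 1) / 2 = rn := by
  have hs1 : 2 * rn - 1 ≤ Nat.sqrt kn := Nat.le_sqrt.mpr h1
  have hs2 : Nat.sqrt kn < 2 * rn + 1 := Nat.sqrt_lt'.mpr h2
  omega

-- behaviour of cell(k) on ring r (k = (2r-1)^2 + j, 0 ≤ j < 8r)
theorem pvCellB_ring (x y r j : Int) (hr : 1 ≤ r) (hj0 : 0 ≤ j) (hj : j < 8 * r) :
    pvCellB x y ((2 * r - 1) ^ 2 + j) =
      (if j ≤ 2 * r then (x - r, y - r + j)
       else if j < 6 * r - 1 then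
         (x - r + 1 + PySem.Int.floordiv (j - (2 * r + 1)) 2,
          if PySem.Int.mod (j - (2 * r + 1)) 2 = 0 then y - r else y + r)
       else (x + r, y - r + (j - (6 * r - 1)))) := by
  have hq1 : (1 : Int) ≤ (2 * r - 1) ^ 2 := by nlinarith
  have hk0 : (2 * r - 1) ^ 2 + j ≠ 0 := by omega
  set k : Int := (2 * r - 1) ^ 2 + j with hk
  have hkpos : 0 < k := by omega
  -- compute the isqrt-derived ring index
  have hrn : (r.toNat : Int) = r := Int.toNat_of_nonneg (by omega)
  have hkn : (k.toNat : Int) = k := Int.toNat_of_nonneg (by omega)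
  have hrad : PySem.Int.floordiv ((Nat.sqrt k.toNat : Int) + 1) 2 = r := by
    have hlo : (2 * r.toNat - 1) * (2 * r.toNat - 1) ≤ k.toNat := by
      have hI : ((2 * r - 1) * (2 * r - 1) : Int) ≤ k := by nlinarith
      zify [show (1 : Nat) ≤ 2 * r.toNat by omega]
      rw [hrn, hkn]
      exact hI
    have hhi : k.toNat < (2 * r.toNat + 1) ^ 2 := by
      have hI : k < (2 * r + 1) ^ 2 := by nlinarith
      zify
      rw [hrn, hkn]
      exact hI
    have hsq := pvSqrt_ring r.toNat k.toNat (by omega) hlo hhi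
    rw [show ((Nat.sqrt k.toNat : Int) + 1) = ((Nat.sqrt k.toNat + 1 : Nat) : Int) by push_cast; ring,
        show (2 : Int) = ((2 : Nat) : Int) by rfl,
        PySem.Int.floordiv_natCast, hsq, hrn]
  simp only [pvCellB, if_neg hk0, hrad]
  have hj' : k - (2 * r - 1) ^ 2 = j := by omega
  rw [hj']

-- Nat pairing: [F(m//2, m%2) for m in range(2c)] = flatten of [[F(i,0), F(i,1)] for i in range(c)]
theorem pvPairSplit {α : Type} (F : Nat → Nat → α) :
    ∀ c : Nat, (List.range (2 * c)).map (fun m => F (m / 2) (m % 2)) =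
      (List.range c).flatMap (fun i => [F i 0, F i 1]) := by
  intro c
  induction c with
  | zero => simp
  | succ c ih =>
    rw [show 2 * (c + 1) = (2 * c + 1) + 1 by omega, List.range_succ, List.range_succ,
        List.range_succ, List.flatMap_append]
    simp only [List.map_append, ih]
    simp only [List.map_cons, List.map_nil, List.flatMap_cons, List.flatMap_nil]
    rw [show (2 * c + 1) / 2 = c by omega, show (2 * c + 1) % 2 = 1 by omega,
        show (2 * c) / 2 = c by omega, show (2 * c) % 2 = 0 by omega]
    simp

-- the cell map over ring r's index block equals ring r
theorem pvMapCell_ring (x y r : Int) (hr : 1 ≤ r) :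
    (PySem.List.pyRange ((2 * r - 1) ^ 2) ((2 * r + 1) ^ 2) 1).map (pvCellB x y) =
      pvRing x y r := by
  set q : Int := (2 * r - 1) ^ 2 with hq
  have hspan : (2 * r + 1) ^ 2 = q + 8 * r := by rw [hq]; ring
  rw [hspan, pvRing_decomp x y r hr]
  -- split the index block into the three segments
  rw [PySem.List.pyRange_one_append q (q + (2 * r + 1)) (q + 8 * r) (by omega) (by omega),
      PySem.List.pyRange_one_append (q + (2 * r + 1)) (q + (6 * r - 1)) (q + 8 * r)
        (by omega) (by omega)]
  simp only [List.map_append]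
  congr 1
  · -- left column
    rw [PySem.List.pyRange_one q (q + (2 * r + 1)), PySem.List.pyRange_one (-r) (r + 1)]
    simp only [List.map_map]
    have hlen : (q + (2 * r + 1) - q).toNat = (r + 1 - -r).toNat := by omega
    rw [hlen]
    apply List.map_congr_left
    intro kn hkn
    rw [List.mem_range] at hkn
    simp only [Function.comp_apply]
    have hb : (kn : Int) ≤ 2 * r := by omega
    have := pvCellB_ring x y r kn hr (by omega) (by omega)
    rw [show q + (kn : Int) = (2 * r - 1) ^ 2 + (kn : Int) by rw [hq], this, if_pos hb]
    exact Prod.ext (by ring) (by ring)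
  congr 1
  · -- interior pairs
    rw [PySem.List.pyRange_one (q + (2 * r + 1)) (q + (6 * r - 1)),
        PySem.List.pyRange_one (-r + 1) r]
    simp only [List.map_map]
    set c : Nat := (r - (-r + 1)).toNat with hc
    rw [show (q + (6 * r - 1) - (q + (2 * r + 1))).toNat = 2 * c by omega,
        List.flatMap_map]
    have key : (List.range (2 * c)).map
        (fun m => ((fun (i p : Nat) =>
            ((x + (-r + 1 + (i : Int)), if p = 0 then y - r else y + r) : Int × Int))
          (m / 2) (m % 2))) =
        (List.range c).flatMap
          (fun (i : Nat) => [((x + (-r + 1 + (i : Int)), y - r) : Int × Int),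
                     (x + (-r + 1 + (i : Int)), y + r)]) := by
      rw [pvPairSplit (fun (i p : Nat) =>
            ((x + (-r + 1 + (i : Int)), if p = 0 then y - r else y + r) : Int × Int)) c]
      apply List.flatMap_congr
      intro i hi
      simp
    refine Eq.trans (List.map_congr_left ?_) key
    intro m hm
    rw [List.mem_range] at hm
    simp only [Function.comp_apply]
    have hcell := pvCellB_ring x y r (2 * r + 1 + (m : Int)) hr (by omega) (by omega)
    rw [show q + (2 * r + 1) + (m : Int) = (2 * r - 1) ^ 2 + (2 * r + 1 + (m : Int)) by
          rw [hq]; ring,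
        hcell, if_neg (by omega), if_pos (by omega)]
    rw [show (2 * r + 1 + (m : Int)) - (2 * r + 1) = ((m : Nat) : Int) by ring,
        show (2 : Int) = ((2 : Nat) : Int) by rfl,
        PySem.Int.floordiv_natCast, PySem.Int.mod_natCast]
    simp only [Prod.mk.injEq]
    refine ⟨by ring, ?_⟩
    by_cases hp : m % 2 = 0
    · simp [hp]
    · have hp1 : m % 2 = 1 := by omega
      simp [hp1]
  · -- right column
    rw [PySem.List.pyRange_one (q + (6 * r - 1)) (q + 8 * r), PySem.List.pyRange_one (-r) (r + 1)]
    simp only [List.map_map]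
    have hlen : (q + 8 * r - (q + (6 * r - 1))).toNat = (r + 1 - -r).toNat := by omega
    rw [hlen]
    apply List.map_congr_left
    intro kn hkn
    rw [List.mem_range] at hkn
    simp only [Function.comp_apply]
    have hb1 : ¬ (6 * r - 1 + (kn : Int)) ≤ 2 * r := by omega
    have hb2 : ¬ (6 * r - 1 + (kn : Int)) < 6 * r - 1 := by omega
    have := pvCellB_ring x y r (6 * r - 1 + (kn : Int)) hr (by omega) (by omega)
    rw [show q + (6 * r - 1) + (kn : Int) = (2 * r - 1) ^ 2 + (6 * r - 1 + (kn : Int)) by rw [hq]; ring,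
        this, if_neg hb1, if_neg hb2]
    exact Prod.ext (by ring) (by ring)

-- the cell map over the whole index range equals the spiral
theorem pvMapCell_spiral (x y : Int) :
    ∀ R : Nat, (PySem.List.pyRange 0 (((2 * R + 1) ^ 2 : Nat) : Int) 1).map (pvCellB x y) =
      pvSpiral x y R := by
  intro R
  induction R with
  | zero =>
    rw [show (((2 * 0 + 1) ^ 2 : Nat) : Int) = 0 + 1 by norm_num, PySem.List.pyRange_one_singleton]
    simp [pvSpiral, pvCellB]
  | succ R ih =>
    have hsplit : PySem.List.pyRange 0 (((2 * (R + 1) + 1) ^ 2 : Nat) : Int) 1 =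
        PySem.List.pyRange 0 (((2 * R + 1) ^ 2 : Nat) : Int) 1 ++
        PySem.List.pyRange (((2 * R + 1) ^ 2 : Nat) : Int) (((2 * (R + 1) + 1) ^ 2 : Nat) : Int) 1 := by
      apply PySem.List.pyRange_one_append
      · positivity
      · have : ((2 * R + 1) ^ 2 : Nat) ≤ ((2 * (R + 1) + 1) ^ 2 : Nat) :=
          Nat.pow_le_pow_left (by omega) 2
        exact_mod_cast this
    rw [hsplit, List.map_append, ih]
    simp only [pvSpiral]
    congr 1
    have h1 : (((2 * R + 1) ^ 2 : Nat) : Int) = (2 * ((R : Int) + 1) - 1) ^ 2 := by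
      push_cast; ring
    have h2 : (((2 * (R + 1) + 1) ^ 2 : Nat) : Int) = (2 * ((R : Int) + 1) + 1) ^ 2 := by
      push_cast; ring
    rw [h1, h2, pvMapCell_ring x y ((R : Int) + 1) (by omega)]

-- ===== VERDICT (by name: the statement is the Claim_ definition above) =====
theorem cluster_pattern_py_spec : Claim_equal_cluster_pattern_py := by
  intro cp n _
  unfold Spec_cluster_pattern_py cluster_pattern_py cluster_pattern_py_alt
  dsimp only
  set x := cp.1
  set y := cp.2
  by_cases hn : n ≤ 0
  · -- empty result on both sides
    rw [PySem.List.pyRange_one_eq_nil (by omega), List.map_nil]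
    rw [show pvWhileA x y n 0 [(x, y)] = [(x, y)] by rw [pvWhileA, dif_neg (by simp; omega)]]
    rcases eq_or_lt_of_le hn with h0 | hneg
    · rw [h0, PySem.List.slice_to _ le_rfl]
      simp
    · rw [show n = -(((-n).toNat : Nat) : Int) by omega,
          PySem.List.slice_to_neg_natCast _ _ (by omega)]
      simp only [List.length_cons, List.length_nil]
      rw [List.take_eq_nil_iff.mpr (by omega)]
  · rw [not_le] at hn
    by_cases h1 : n = 1
    · subst h1
      rw [show pvWhileA x y 1 0 [(x, y)] = [(x, y)] by rw [pvWhileA, dif_neg (by simp)]]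
      rw [PySem.List.slice_to _ (by omega),
          show PySem.List.pyRange 0 1 1 = [0] from by decide]
      simp [pvCellB]
    · have hn2 : 2 ≤ n := by omega
      set R : Nat := n.toNat with hR
      have hRlen : n ≤ ((pvSpiral x y R).length : Int) := by
        rw [pvSpiral_len]
        have : R ≤ (2 * R + 1) ^ 2 := by nlinarith [sq_nonneg (2 * R + 1)]
        omega
      have hstart : ((pvSpiral x y 0).length : Int) < n := by simp [pvSpiral]; omega
      have hA : pvWhileA x y n 0 [(x, y)] = List.take n.toNat (pvSpiral x y R) := by
        have := pvWhileA_eq_take x y n (n - 1).toNat 0 (by simp only [pvSpiral, List.length_cons, List.length_nil]; omega) hstart R hRlen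
        simpa [pvSpiral] using this
      rw [hA, PySem.List.slice_to _ (by omega), List.take_take, min_self]
      -- B: range(n) is a prefix of the full index range
      have hnleL : n ≤ (((2 * R + 1) ^ 2 : Nat) : Int) := by
        rw [pvSpiral_len] at hRlen
        exact_mod_cast hRlen
      rw [show PySem.List.pyRange 0 n 1 =
            List.take n.toNat (PySem.List.pyRange 0 (((2 * R + 1) ^ 2 : Nat) : Int) 1) by
        rw [PySem.List.pyRange_one_append 0 n (((2 * R + 1) ^ 2 : Nat) : Int) (by omega) hnleL,
            List.take_append_of_le_length (by rw [PySem.List.length_pyRange_one]; omega),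
            List.take_of_length_le (by rw [PySem.List.length_pyRange_one]; omega)]]
      rw [List.map_take, pvMapCell_spiral]
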